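-- pv_equiv track=rewrite | github.com/uzairdurani/DataStructures-And-Algo-Questions | ArraysQuestions/SmallestSumSubarray.py | FindSmallestSubArrays
-- ===== SOURCE A (Python) =====
-- def FindSmallestSubArrays(arr, n, x):
--     min_len = len(arr)
--     start = 0
--     end = 0
--     curr_sum = 0
--     while end < n:
--         while curr_sum <= x and end < n:
--             curr_sum += arr[end]
--             end += 1
--         while curr_sum > x and start < n:
--             if end-start < min_len:
--                 min_len = end-start
--             curr_sum -= arr[start]
--             start += 1
--     return min_len
-- ===== SOURCE B (Python) =====
-- def FindSmallestSubArrays(arr, n, x):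
--     # direct nested scan over all (start, end) pairs, keeping the running minimum
--     min_len = len(arr)
--     for i in range(n):
--         s = 0
--         for j in range(i, n):
--             s += arr[j]
--             if s > x and j + 1 - i < min_len:
--                 min_len = j + 1 - i
--     return min_len
-- ===== Notes on version B (the rewrite author's own statement) =====
-- stated objective: simpler
-- what changed: Replaced the stateful three-nested-while sliding window (min_len/start/end/curr_sum juggling) with a plain brute-force scan over all start indices with a running inner sum, keeping the minimum length of any window whose sum exceeds x.
-- outside the precondition, e.g. on FindSmallestSubArrays([1], 1, -1): A returns 0, B returns 1; on FindSmallestSubArrays([0], 1, -1): A does not finish within the time limit, B returns 1; on FindSmallestSubArrays([-2, 3, 4], 3, 6): A returns 3, B returns 2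
import Mathlib
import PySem

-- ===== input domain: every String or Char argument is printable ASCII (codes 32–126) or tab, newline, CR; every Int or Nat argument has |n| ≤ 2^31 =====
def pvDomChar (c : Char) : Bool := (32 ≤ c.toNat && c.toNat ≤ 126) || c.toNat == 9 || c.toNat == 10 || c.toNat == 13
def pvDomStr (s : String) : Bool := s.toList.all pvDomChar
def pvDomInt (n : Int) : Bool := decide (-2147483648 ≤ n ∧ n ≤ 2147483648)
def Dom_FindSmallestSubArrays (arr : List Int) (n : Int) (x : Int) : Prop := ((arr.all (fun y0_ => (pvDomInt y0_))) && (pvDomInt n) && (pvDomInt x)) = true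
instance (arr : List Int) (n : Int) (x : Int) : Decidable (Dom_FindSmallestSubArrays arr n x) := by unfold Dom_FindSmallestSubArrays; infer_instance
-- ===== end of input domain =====

-- B replaces A's three-nested-while sliding window with a plain brute-force scan over all
-- (start, end) pairs; objective: simpler.

-- ===== PORT A =====
-- A's while loops are ported as fuel recursions; arr.length + 1 fuel per loop suffices on
-- every Pre_ input (each loop strictly advances an index bounded by n ≤ len(arr)).
-- arr[end] / arr[start] are ported with pyGetD (default 0): under Pre_ the index is in range.

-- inner loop 1: while curr_sum <= x and end < n: curr_sum += arr[end]; end += 1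
def pvGrowA (arr : List Int) (n : Int) (x : Int) : Nat → Int × Int → Int × Int
  | 0, st => st
  | f + 1, (c, e) =>
    if c ≤ x ∧ e < n then pvGrowA arr n x f (c + PySem.List.pyGetD arr e 0, e + 1) else (c, e)

-- inner loop 2: while curr_sum > x and start < n: (record end-start); curr_sum -= arr[start]; start += 1
def pvShrinkA (arr : List Int) (n : Int) (x : Int) (e : Int) : Nat → Int × Int × Int → Int × Int × Int
  | 0, st => st
  | f + 1, (m, c, s) =>
    if c > x ∧ s < n then
      pvShrinkA arr n x e f ((if e - s < m then e - s else m), c - PySem.List.pyGetD arr s 0, s + 1)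
    else (m, c, s)

-- outer loop: while end < n; state (min_len, start, end, curr_sum)
def pvOuterA (arr : List Int) (n : Int) (x : Int) : Nat → Int × Int × Int × Int → Int
  | 0, (m, _, _, _) => m
  | f + 1, (m, s, e, c) =>
    if e < n then
      let g := pvGrowA arr n x (arr.length + 1) (c, e)
      let r := pvShrinkA arr n x g.2 (arr.length + 1) (m, g.1, s)
      pvOuterA arr n x f (r.1, r.2.2, g.2, r.2.1)
    else m

def FindSmallestSubArrays (arr : List Int) (n : Int) (x : Int) : Int :=
  pvOuterA arr n x (arr.length + 1) ((arr.length : Int), 0, 0, 0)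

-- ===== PORT B =====
-- Source B: min_len = len(arr); for i in range(n): s = 0; for j in range(i, n):
--         s += arr[j]; if s > x and j+1-i < min_len: min_len = j+1-i
def FindSmallestSubArrays_alt (arr : List Int) (n : Int) (x : Int) : Int :=
  (PySem.List.pyRange 0 n 1).foldl
    (fun m i =>
      ((PySem.List.pyRange i n 1).foldl
        (fun (p : Int × Int) j =>
          let s := p.1 + PySem.List.pyGetD arr j 0
          (s, if s > x ∧ j + 1 - i < p.2 then j + 1 - i else p.2))
        (0, m)).2)
    (arr.length : Int)

-- ===== PRECONDITION & SPEC =====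
-- Pre_ is the classic problem's natural domain: n ≤ len(arr), and (when n > 0, so that the
-- scan runs at all) nonnegative values among the scanned prefix arr[:n] and a nonnegative
-- threshold x.  It excludes n > len(arr), where A never returns (IndexError or
-- non-termination), and x < 0 or a negative scanned element, where A's sliding-window
-- shrink is invalid: there A either loops forever (e.g. ([0], 1, -1)) or returns values
-- that are not the length of any sum-exceeding window (0 or -1 for x < 0, e.g. ([1], 1, -1);
-- a wrong window length with negative elements, e.g. ([-2, 3, 4], 3, 6) gives 3 though
-- [3, 4] sums to 7 > 6).  On some excluded inputs A's scan happens to coincide with B;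
-- the whole region is excluded because no closed-form condition separates those from the
-- divergent/wrong ones.
def Pre_FindSmallestSubArrays (arr : List Int) (n : Int) (x : Int) : Prop :=
  n ≤ (arr.length : Int) ∧ (n ≤ 0 ∨ ((∀ a ∈ arr.take n.toNat, 0 ≤ a) ∧ 0 ≤ x))
instance (arr : List Int) (n : Int) (x : Int) : Decidable (Pre_FindSmallestSubArrays arr n x) := by
  unfold Pre_FindSmallestSubArrays; infer_instance

def pvWitness_FindSmallestSubArrays : List Int × Int × Int := ([1, 2, 3], 3, 4)

def Spec_FindSmallestSubArrays (arr : List Int) (n : Int) (x : Int) (out : Int) : Prop := out = FindSmallestSubArrays_alt arr n x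
instance (arr : List Int) (n : Int) (x : Int) (out : Int) : Decidable (Spec_FindSmallestSubArrays arr n x out) := by unfold Spec_FindSmallestSubArrays; infer_instance

-- ===== CLAIM (what is proved, stated in full; the proofs are below) =====
def Claim_equal_FindSmallestSubArrays : Prop := ∀ (arr : List Int) (n : Int) (x : Int), Dom_FindSmallestSubArrays arr n x → Pre_FindSmallestSubArrays arr n x → Spec_FindSmallestSubArrays arr n x (FindSmallestSubArrays arr n x)

-- ===== LEMMAS AND PROOFS =====

-- prefix sums: pvS arr k = arr[0] + … + arr[k-1]
def pvS (arr : List Int) (k : Nat) : Int := (arr.take k).sum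

theorem pvS_succ (arr : List Int) (k : Nat) (h : k < arr.length) :
    pvS arr (k + 1) = pvS arr k + arr.getD k 0 := by
  unfold pvS
  rw [List.getD_eq_getElem _ _ h]
  exact List.sum_take_succ arr k h

theorem pvS_mono (arr : List Int) (K : Nat) (hK : K ≤ arr.length)
    (hnn : ∀ a ∈ arr.take K, 0 ≤ a) {i j : Nat}
    (hij : i ≤ j) (hj : j ≤ K) : pvS arr i ≤ pvS arr j := by
  obtain ⟨d, rfl⟩ := Nat.le.dest hij
  induction d with
  | zero => simp
  | succ d ih =>
    have hd : i + d < K := by omega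
    have hdl : i + d < arr.length := by omega
    have h1 := ih (by omega)
    have h0 : 0 ≤ arr.getD (i + d) 0 := by
      rw [List.getD_eq_getElem _ _ hdl]
      refine hnn _ ?_
      rw [List.mem_take_iff_getElem]
      exact ⟨i + d, by omega, by simp⟩
    have h2 := pvS_succ arr (i + d) hdl
    have h3 : i + (d + 1) = (i + d) + 1 := by omega
    rw [h3, h2]
    omega

-- m is a lower bound on all window lengths with sum > x among windows ending at j ≤ e
def pvLB (arr : List Int) (x : Int) (e : Nat) (m : Int) : Prop :=
  ∀ i j : Nat, i < j → j ≤ e → pvS arr j - pvS arr i > x → m ≤ (j : Int) - (i : Int)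

-- m is attained: either the default len(arr) or the length of a sum > x window ending ≤ e
def pvAT (arr : List Int) (x : Int) (e : Nat) (m : Int) : Prop :=
  m = (arr.length : Int) ∨
    ∃ i j : Nat, i < j ∧ j ≤ e ∧ pvS arr j - pvS arr i > x ∧ m = (j : Int) - (i : Int)

theorem pvGood_unique (arr : List Int) (x : Int) (e : Nat) (m1 m2 : Int)
    (he : e ≤ arr.length)
    (h1 : pvLB arr x e m1 ∧ pvAT arr x e m1)
    (h2 : pvLB arr x e m2 ∧ pvAT arr x e m2) : m1 = m2 := by
  obtain ⟨lb1, at1⟩ := h1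
  obtain ⟨lb2, at2⟩ := h2
  have key : ∀ a b : Int, pvLB arr x e a → pvAT arr x e a → pvAT arr x e b → a ≤ b := by
    intro a b lba ata atb
    rcases atb with hb | ⟨i, j, hij, hje, hs, hb⟩
    · rcases ata with ha | ⟨i, j, hij, hje, _, ha⟩
      · omega
      · have hjl : (j : Int) ≤ (arr.length : Int) := by exact_mod_cast Nat.le_trans hje he
        omega
    · have := lba i j hij hje hs
      omega
  have h12 := key m1 m2 lb1 at1 at2
  have h21 := key m2 m1 lb2 at2 at1
  omega

-- ---- A side ----

theorem pvGrowA_spec (arr : List Int) (x : Int) (N : Nat) (hN : N ≤ arr.length) :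
    ∀ (f : Nat) (e : Nat) (c : Int), e ≤ N → N - e ≤ f →
    ∃ e1 : Nat,
      pvGrowA arr (N : Int) x f (c, (e : Int)) = (c + (pvS arr e1 - pvS arr e), (e1 : Int)) ∧
      e ≤ e1 ∧ e1 ≤ N ∧
      (∀ j : Nat, e ≤ j → j < e1 → c + (pvS arr j - pvS arr e) ≤ x) ∧
      (¬ c + (pvS arr e1 - pvS arr e) ≤ x ∨ e1 = N) := by
  intro f
  induction f with
  | zero =>
    intro e c he hf
    have heN : e = N := by omega
    refine ⟨e, by simp [pvGrowA], le_refl _, he, by omega, Or.inr heN⟩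
  | succ f ih =>
    intro e c he hf
    by_cases hcond : c ≤ x ∧ (e : Int) < (N : Int)
    · have heN : e < N := by exact_mod_cast hcond.2
      have heL : e < arr.length := by omega
      obtain ⟨e1, heq, h1, h2, h3, h4⟩ :=
        ih (e + 1) (c + arr.getD e 0) (by omega) (by omega)
      have hS := pvS_succ arr e heL
      refine ⟨e1, ?_, by omega, h2, ?_, ?_⟩
      · show pvGrowA arr (N : Int) x (f + 1) (c, (e : Int)) = _
        rw [pvGrowA, if_pos hcond, PySem.List.pyGetD_natCast]
        have hc : (e : Int) + 1 = ((e + 1 : Nat) : Int) := by push_cast; ring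
        rw [hc, heq, Prod.mk.injEq]
        exact ⟨by omega, rfl⟩
      · intro j hj hje1
        rcases Nat.eq_or_lt_of_le hj with rfl | hj'
        · simpa using hcond.1
        · have := h3 j (by omega) hje1
          omega
      · rcases h4 with h | h
        · left; omega
        · right; exact h
    · refine ⟨e, ?_, le_refl _, he, by omega, ?_⟩
      · show pvGrowA arr (N : Int) x (f + 1) (c, (e : Int)) = _
        rw [pvGrowA, if_neg hcond, Prod.mk.injEq]
        exact ⟨by omega, rfl⟩
      · rcases not_and_or.mp hcond with h | h
        · left; omega
        · right
          have : ¬ e < N := fun hh => h (by exact_mod_cast hh)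
          omega

theorem pvShrinkA_spec (arr : List Int) (x : Int) (N : Nat) (hN : N ≤ arr.length)
    (hx : 0 ≤ x) (e1 : Nat) (he1 : e1 ≤ N) :
    ∀ (f : Nat) (s : Nat) (m : Int), s ≤ e1 → e1 - s ≤ f →
    ∃ (s' : Nat) (m' : Int),
      pvShrinkA arr (N : Int) x (e1 : Int) f (m, pvS arr e1 - pvS arr s, (s : Int)) =
        (m', pvS arr e1 - pvS arr s', (s' : Int)) ∧
      s ≤ s' ∧ s' ≤ e1 ∧ pvS arr e1 - pvS arr s' ≤ x ∧
      (∀ i : Nat, s ≤ i → i < s' → pvS arr e1 - pvS arr i > x) ∧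
      m' ≤ m ∧ (∀ i : Nat, s ≤ i → i < s' → m' ≤ (e1 : Int) - (i : Int)) ∧
      (m' = m ∨ ∃ i : Nat, s ≤ i ∧ i < s' ∧ m' = (e1 : Int) - (i : Int)) := by
  intro f
  induction f with
  | zero =>
    intro s m hs hf
    have hse : s = e1 := by omega
    subst hse
    refine ⟨s, m, by simp [pvShrinkA], le_refl _, le_refl _, by omega, ?_, le_refl _, ?_, Or.inl rfl⟩
    · intro i h1 h2; omega
    · intro i h1 h2; omega
  | succ f ih =>
    intro s m hs hf
    by_cases hcond : pvS arr e1 - pvS arr s > x ∧ (s : Int) < (N : Int)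
    · have hse : s < e1 := by
        rcases Nat.eq_or_lt_of_le hs with rfl | h
        · exfalso; omega
        · exact h
      have hsL : s < arr.length := by omega
      have hS := pvS_succ arr s hsL
      set m1 : Int := if (e1 : Int) - (s : Int) < m then (e1 : Int) - (s : Int) else m with hm1
      obtain ⟨s', m', heq, h1, h2, h3, h4, h5, h6, h7⟩ := ih (s + 1) m1 (by omega) (by omega)
      refine ⟨s', m', ?_, by omega, h2, h3, ?_, ?_, ?_, ?_⟩
      · show pvShrinkA arr (N : Int) x (e1 : Int) (f + 1) _ = _
        rw [pvShrinkA, if_pos hcond, PySem.List.pyGetD_natCast]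
        have hc : (s : Int) + 1 = ((s + 1 : Nat) : Int) := by push_cast; ring
        rw [hc]
        have hcs : pvS arr e1 - pvS arr s - arr.getD s 0 = pvS arr e1 - pvS arr (s + 1) := by omega
        rw [hcs, ← hm1, heq]
      · intro i hi1 hi2
        rcases Nat.eq_or_lt_of_le hi1 with rfl | h
        · exact hcond.1
        · exact h4 i (by omega) hi2
      · have : m1 ≤ m := by rw [hm1]; split <;> omega
        omega
      · intro i hi1 hi2
        rcases Nat.eq_or_lt_of_le hi1 with heq | h
        · have hb : m1 ≤ (e1 : Int) - (s : Int) := by rw [hm1]; split <;> omega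
          omega
        · exact h6 i (by omega) hi2
      · rcases h7 with h | ⟨i, hi1, hi2, hi3⟩
        · rw [h, hm1]
          split
          · exact Or.inr ⟨s, le_refl _, by omega, rfl⟩
          · exact Or.inl rfl
        · exact Or.inr ⟨i, by omega, hi2, hi3⟩
    · have hcx : pvS arr e1 - pvS arr s ≤ x := by
        rcases not_and_or.mp hcond with h | h
        · omega
        · have hsN : ¬ s < N := fun hh => h (by exact_mod_cast hh)
          have : s = e1 := by omega
          subst this
          omega
      refine ⟨s, m, ?_, le_refl _, hs, hcx, ?_, le_refl _, ?_, Or.inl rfl⟩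
      · show pvShrinkA arr (N : Int) x (e1 : Int) (f + 1) _ = _
        rw [pvShrinkA, if_neg hcond]
      · intro i h1 h2; omega
      · intro i h1 h2; omega

theorem pvOuterA_spec (arr : List Int) (x : Int) (N : Nat) (hN : N ≤ arr.length)
    (hx : 0 ≤ x) (hnn : ∀ a ∈ arr.take N, 0 ≤ a) :
    ∀ (f : Nat) (s e : Nat) (m : Int), s ≤ e → e ≤ N → N - e < f →
    pvS arr e - pvS arr s ≤ x →
    pvLB arr x e m → pvAT arr x e m →
    (∀ i : Nat, i < s → ∃ j : Nat, i < j ∧ j ≤ e ∧ pvS arr j - pvS arr i > x) →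
    pvLB arr x N (pvOuterA arr (N : Int) x f (m, (s : Int), (e : Int), pvS arr e - pvS arr s)) ∧
    pvAT arr x N (pvOuterA arr (N : Int) x f (m, (s : Int), (e : Int), pvS arr e - pvS arr s)) := by
  intro f
  induction f with
  | zero =>
    intro s e m hse heN hf
    omega
  | succ f ih =>
    intro s e m hse heN hf hcx hLB hAT hRec
    by_cases heN' : (e : Int) < (N : Int)
    · have heN2 : e < N := by exact_mod_cast heN'
      obtain ⟨e1, hgeq, hg1, hg2, hg3, hg4⟩ :=
        pvGrowA_spec arr x N hN (arr.length + 1) e (pvS arr e - pvS arr s) heN (by omega)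
      have hee1 : e < e1 := by
        rcases Nat.eq_or_lt_of_le hg1 with rfl | h
        · exfalso
          rcases hg4 with h | h
          · simp at h; omega
          · omega
        · exact h
      have hc1 : pvS arr e - pvS arr s + (pvS arr e1 - pvS arr e) = pvS arr e1 - pvS arr s := by
        ring
      obtain ⟨s', m', hseq, hs1, hs2, hs3, hs4, hs5, hs6, hs7⟩ :=
        pvShrinkA_spec arr x N hN hx e1 hg2 (arr.length + 1) s m (by omega) (by omega)
      have hstep : pvOuterA arr (N : Int) x (f + 1) (m, (s : Int), (e : Int), pvS arr e - pvS arr s) =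
          pvOuterA arr (N : Int) x f (m', (s' : Int), (e1 : Int), pvS arr e1 - pvS arr s') := by
        rw [pvOuterA, if_pos heN']
        simp only [hgeq, hc1, hseq]
      rw [hstep]
      -- new invariants at (s', e1, m')
      have hLB' : pvLB arr x e1 m' := by
        intro i j hij hje1 hsum
        by_cases hje : j ≤ e
        · have := hLB i j hij hje hsum
          omega
        · push_neg at hje
          by_cases his : i < s
          · obtain ⟨j0, hj01, hj02, hj03⟩ := hRec i his
            have hb := hLB i j0 hj01 hj02 hj03
            have hj0e : (j0 : Int) ≤ (e : Int) := by exact_mod_cast hj02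
            omega
          · push_neg at his
            by_cases hje1' : j < e1
            · exfalso
              have hgj := hg3 j (by omega) hje1'
              have hmono : pvS arr s ≤ pvS arr i := pvS_mono arr N hN hnn his (by omega)
              omega
            · have hj_e1 : j = e1 := by omega
              subst hj_e1
              by_cases his' : i < s'
              · exact hs6 i his his'
              · push_neg at his'
                exfalso
                have hmono : pvS arr s' ≤ pvS arr i := pvS_mono arr N hN hnn his' (by omega)
                omega
      have hAT' : pvAT arr x e1 m' := by
        rcases hs7 with h | ⟨i, hi1, hi2, hi3⟩
        · rcases hAT with h' | ⟨i, j, h1, h2, h3, h4⟩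
          · exact Or.inl (by omega)
          · exact Or.inr ⟨i, j, h1, by omega, h3, by omega⟩
        · exact Or.inr ⟨i, e1, by omega, le_refl _, hs4 i hi1 hi2, hi3⟩
      have hRec' : ∀ i : Nat, i < s' → ∃ j : Nat, i < j ∧ j ≤ e1 ∧ pvS arr j - pvS arr i > x := by
        intro i hi
        by_cases his : i < s
        · obtain ⟨j0, h1, h2, h3⟩ := hRec i his
          exact ⟨j0, h1, by omega, h3⟩
        · push_neg at his
          exact ⟨e1, by omega, le_refl _, hs4 i his hi⟩
      exact ih s' e1 m' hs2 hg2 (by omega) hs3 hLB' hAT' hRec'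
    · have heq : e = N := by
        have : ¬ e < N := fun hh => heN' (by exact_mod_cast hh)
        omega
      subst heq
      have : pvOuterA arr (e : Int) x (f + 1) (m, (s : Int), (e : Int), pvS arr e - pvS arr s) = m := by
        rw [pvOuterA, if_neg heN']
      rw [this]
      exact ⟨hLB, hAT⟩

-- ---- B side ----

theorem pvInnerB_spec (arr : List Int) (x : Int) (N : Nat) (hN : N ≤ arr.length) (i : Nat) :
    ∀ (d j : Nat) (m : Int), i ≤ j → j + d = N →
    ∃ m' : Int,
      ((PySem.List.pyRange (j : Int) (N : Int) 1).foldl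
        (fun (p : Int × Int) jj =>
          let s := p.1 + PySem.List.pyGetD arr jj 0
          (s, if s > x ∧ jj + 1 - (i : Int) < p.2 then jj + 1 - (i : Int) else p.2))
        (pvS arr j - pvS arr i, m)).2 = m' ∧
      m' ≤ m ∧
      (∀ k : Nat, j ≤ k → k < N → pvS arr (k + 1) - pvS arr i > x → m' ≤ ((k : Int) + 1) - (i : Int)) ∧
      (m' = m ∨ ∃ k : Nat, j ≤ k ∧ k < N ∧ pvS arr (k + 1) - pvS arr i > x ∧ m' = ((k : Int) + 1) - (i : Int)) := by
  intro d
  induction d with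
  | zero =>
    intro j m hij hjd
    have : j = N := by omega
    subst this
    rw [PySem.List.pyRange_one_eq_nil (le_refl _)]
    refine ⟨m, rfl, le_refl _, ?_, Or.inl rfl⟩
    intro k h1 h2; omega
  | succ d ih =>
    intro j m hij hjd
    have hjN : j < N := by omega
    have hjL : j < arr.length := by omega
    have hcast : ((j : Int) : Int) < (N : Int) := by exact_mod_cast hjN
    have hS := pvS_succ arr j hjL
    rw [PySem.List.pyRange_one_cons hcast]
    simp only [List.foldl_cons, PySem.List.pyGetD_natCast, Int.toNat_natCast]
    have hs1 : pvS arr j - pvS arr i + arr.getD j 0 = pvS arr (j + 1) - pvS arr i := by omega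
    have hc : (j : Int) + 1 = ((j + 1 : Nat) : Int) := by push_cast; ring
    rw [hs1, hc]
    set m1 : Int := if pvS arr (j + 1) - pvS arr i > x ∧ ((j + 1 : Nat) : Int) - (i : Int) < m
        then ((j + 1 : Nat) : Int) - (i : Int) else m with hm1
    obtain ⟨m', heq, h1, h2, h3⟩ := ih (j + 1) m1 (by omega) (by omega)
    refine ⟨m', ?_, ?_, ?_, ?_⟩
    · exact heq
    · have : m1 ≤ m := by rw [hm1]; split <;> omega
      omega
    · intro k hk1 hk2 hk3
      rcases Nat.eq_or_lt_of_le hk1 with hkeq | h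
      · subst hkeq
        have hm1k : m1 ≤ ((j : Int) + 1) - (i : Int) := by
          rw [hm1]
          split
          · push_cast
            omega
          · rename_i hneg
            rw [not_and_or] at hneg
            rcases hneg with h' | h'
            · exfalso; omega
            · push_cast at h' ⊢
              omega
        omega
      · exact h2 k (by omega) hk2 hk3
    · rcases h3 with h | ⟨k, hk1, hk2, hk3, hk4⟩
      · rw [h, hm1]
        split
        · rename_i hpos
          refine Or.inr ⟨j, le_refl _, hjN, hpos.1, by push_cast; ring⟩
        · exact Or.inl rfl
      · exact Or.inr ⟨k, by omega, hk2, hk3, hk4⟩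

theorem pvOuterB_spec (arr : List Int) (x : Int) (N : Nat) (hN : N ≤ arr.length) :
    ∀ (d i0 : Nat) (m : Int), i0 + d = N →
    (∀ i j : Nat, i < i0 → i < j → j ≤ N → pvS arr j - pvS arr i > x → m ≤ (j : Int) - (i : Int)) →
    (m = (arr.length : Int) ∨
      ∃ i j : Nat, i < j ∧ j ≤ N ∧ pvS arr j - pvS arr i > x ∧ m = (j : Int) - (i : Int)) →
    pvLB arr x N ((PySem.List.pyRange (i0 : Int) (N : Int) 1).foldl
        (fun m i =>
          ((PySem.List.pyRange i (N : Int) 1).foldl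
            (fun (p : Int × Int) j =>
              let s := p.1 + PySem.List.pyGetD arr j 0
              (s, if s > x ∧ j + 1 - i < p.2 then j + 1 - i else p.2))
            (0, m)).2) m) ∧
    pvAT arr x N ((PySem.List.pyRange (i0 : Int) (N : Int) 1).foldl
        (fun m i =>
          ((PySem.List.pyRange i (N : Int) 1).foldl
            (fun (p : Int × Int) j =>
              let s := p.1 + PySem.List.pyGetD arr j 0
              (s, if s > x ∧ j + 1 - i < p.2 then j + 1 - i else p.2))
            (0, m)).2) m) := by
  intro d
  induction d with
  | zero =>
    intro i0 m hd hPLB hPAT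
    have : i0 = N := by omega
    subst this
    rw [PySem.List.pyRange_one_eq_nil (le_refl _)]
    constructor
    · intro i j hij hje hsum
      exact hPLB i j (by omega) hij hje hsum
    · exact hPAT
  | succ d ih =>
    intro i0 m hd hPLB hPAT
    have hi0N : i0 < N := by omega
    have hcast : ((i0 : Int) : Int) < (N : Int) := by exact_mod_cast hi0N
    rw [PySem.List.pyRange_one_cons hcast]
    simp only [List.foldl_cons]
    obtain ⟨m1, heq, h1, h2, h3⟩ :=
      pvInnerB_spec arr x N hN i0 (d + 1) i0 m (le_refl _) (by omega)
    rw [show pvS arr i0 - pvS arr i0 = (0 : Int) from by omega] at heq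
    rw [heq]
    have hc : (i0 : Int) + 1 = ((i0 + 1 : Nat) : Int) := by push_cast; ring
    rw [hc]
    apply ih (i0 + 1) m1 (by omega)
    · intro i j hi hij hje hsum
      rcases Nat.lt_or_ge i i0 with h | h
      · have := hPLB i j h hij hje hsum
        omega
      · have hii0 : i = i0 := by omega
        subst hii0
        have hk := h2 (j - 1) (by omega) (by omega) (by
          have : j - 1 + 1 = j := by omega
          rw [this]; exact hsum)
        have hjc : ((j - 1 : Nat) : Int) + 1 = (j : Int) := by
          have : 1 ≤ j := by omega
          push_cast [this]
          omega
        omega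
    · rcases h3 with h | ⟨k, hk1, hk2, hk3, hk4⟩
      · rcases hPAT with h' | ⟨i, j, ha, hb, hc', hd'⟩
        · exact Or.inl (by omega)
        · exact Or.inr ⟨i, j, ha, hb, hc', by omega⟩
      · exact Or.inr ⟨i0, k + 1, by omega, by omega, hk3, by push_cast; omega⟩

-- ===== VERDICT (by name: the statement is the Claim_ definition above) =====
theorem FindSmallestSubArrays_spec : Claim_equal_FindSmallestSubArrays := by
  intro arr n x hDom hPre
  obtain ⟨hnlen, hPre2⟩ := hPre
  unfold Spec_FindSmallestSubArrays
  by_cases hn : 0 < n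
  · rcases hPre2 with hle0 | ⟨hnn, hx⟩
    · omega
    set N : Nat := n.toNat with hNdef
    have hnN : n = (N : Int) := by rw [hNdef]; exact (Int.toNat_of_nonneg (by omega)).symm
    have hNlen : N ≤ arr.length := by
      have : (N : Int) ≤ (arr.length : Int) := by rw [← hnN]; exact hnlen
      exact_mod_cast this
    -- A's result
    have hA : pvLB arr x N (FindSmallestSubArrays arr n x) ∧
        pvAT arr x N (FindSmallestSubArrays arr n x) := by
      unfold FindSmallestSubArrays
      rw [hnN]
      have h0 : pvS arr 0 - pvS arr 0 = 0 := by omega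
      have := pvOuterA_spec arr x N hNlen hx hnn (arr.length + 1) 0 0 (arr.length : Int)
        (le_refl _) (by omega) (by omega) (by omega)
        (by intro i j hij hje hsum; omega)
        (Or.inl rfl)
        (by intro i hi; omega)
      simpa [h0] using this
    -- B's result
    have hB : pvLB arr x N (FindSmallestSubArrays_alt arr n x) ∧
        pvAT arr x N (FindSmallestSubArrays_alt arr n x) := by
      unfold FindSmallestSubArrays_alt
      rw [hnN]
      have h0 : ((0 : Int) : Int) = ((0 : Nat) : Int) := by norm_num
      have := pvOuterB_spec arr x N hNlen N 0 (arr.length : Int) (by omega)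
        (by intro i j hi; omega)
        (Or.inl rfl)
      simpa using this
    exact pvGood_unique arr x N _ _ hNlen hA hB
  · push_neg at hn
    have hA : FindSmallestSubArrays arr n x = (arr.length : Int) := by
      unfold FindSmallestSubArrays
      rw [pvOuterA, if_neg (by omega)]
    have hB : FindSmallestSubArrays_alt arr n x = (arr.length : Int) := by
      unfold FindSmallestSubArrays_alt
      rw [PySem.List.pyRange_one_eq_nil (by omega)]
      rfl
    rw [hA, hB]
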